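-- pv_equiv track=rewrite | github.com/timctrahan/AI_DM | agent_parts_v2/TOOLS/assemble_protocol_library.py | build_protocol_index
-- ===== SOURCE A (Python) =====
-- def build_protocol_index(protocol_ids):
--     """Build the master index of all protocols, organized by category"""
--
--     # Categorize protocols by prefix
--     categories = {
--         'session_management': [],
--         'game_loop': [],
--         'combat': [],
--         'progression': [],
--         'utilities': [],
--         'meta': []
--     }
--
--     for proto_id in protocol_ids:
--         # Categorize based on common prefixes
--         if 'session' in proto_id or 'character' in proto_id or 'init' in proto_id or 'resume' in proto_id or 'state' in proto_id:
--             categories['session_management'].append(proto_id)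
--         elif 'game_loop' in proto_id or 'exploration' in proto_id or 'movement' in proto_id or 'investigation' in proto_id or 'npc' in proto_id:
--             categories['game_loop'].append(proto_id)
--         elif 'combat' in proto_id or 'attack' in proto_id or 'death' in proto_id:
--             categories['combat'].append(proto_id)
--         elif 'xp' in proto_id or 'level' in proto_id or 'quest' in proto_id or 'loot' in proto_id or 'reputation' in proto_id:
--             categories['progression'].append(proto_id)
--         elif 'shop' in proto_id or 'rest' in proto_id or 'inventory' in proto_id:
--             categories['utilities'].append(proto_id)
--         else:
--             categories['meta'].append(proto_id)
--
--     # Build index text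
--     index_lines = ["[PROTOCOL_INDEX]"]
--
--     for category_name, protocol_list in categories.items():
--         if protocol_list:  # Only include categories that have protocols
--             index_lines.append(f"{category_name}:")
--             for proto_id in protocol_list:
--                 index_lines.append(f"  - {proto_id}")
--
--     return '\n'.join(index_lines)
-- ===== SOURCE B (Python) =====
-- CATEGORIES = [
--     ("session_management", ("session", "character", "init", "resume", "state")),
--     ("game_loop", ("game_loop", "exploration", "movement", "investigation", "npc")),
--     ("combat", ("combat", "attack", "death")),
--     ("progression", ("xp", "level", "quest", "loot", "reputation")),
--     ("utilities", ("shop", "rest", "inventory")),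
-- ]
--
--
-- def _cat(proto_id):
--     """Index of the first category whose keyword list matches; len(CATEGORIES) = meta."""
--     return next((i for i, (_, kws) in enumerate(CATEGORIES)
--                  if any(k in proto_id for k in kws)), len(CATEGORIES))
--
--
-- def build_protocol_index(protocol_ids):
--     names = [name for name, _ in CATEGORIES] + ["meta"]
--     cats = [_cat(p) for p in protocol_ids]
--     lines = ["[PROTOCOL_INDEX]"]
--     for i, name in enumerate(names):
--         members = [p for p, c in zip(protocol_ids, cats) if c == i]
--         if members:
--             lines.append(name + ":")
--             lines.extend("  - " + p for p in members)
--     return "\n".join(lines)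
-- ===== Notes on version B (the rewrite author's own statement) =====
-- stated objective: alternative
-- what changed: Replaces the hard-coded elif chain and six-way dict partition with a data-driven keyword table: a first-match category-index function over the table, category indices precomputed once per id, and the output built by one zip-filter pass per category in table order.
import Mathlib
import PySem

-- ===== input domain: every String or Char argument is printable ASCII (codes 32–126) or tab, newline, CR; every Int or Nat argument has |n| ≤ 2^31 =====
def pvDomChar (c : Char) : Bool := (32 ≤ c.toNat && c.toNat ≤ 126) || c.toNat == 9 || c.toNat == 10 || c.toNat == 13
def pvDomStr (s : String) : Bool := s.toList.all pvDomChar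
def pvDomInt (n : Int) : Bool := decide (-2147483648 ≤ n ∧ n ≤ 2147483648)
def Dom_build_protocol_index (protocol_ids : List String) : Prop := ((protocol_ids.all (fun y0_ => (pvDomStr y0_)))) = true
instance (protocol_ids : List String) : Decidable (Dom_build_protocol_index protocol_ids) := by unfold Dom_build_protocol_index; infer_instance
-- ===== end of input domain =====

-- B replaces A's hard-coded elif chain and six-way partition with a keyword table,
-- a first-match category-index function and one filter pass per category (alternative decomposition).

-- ===== PORT A =====
-- A's dict has six fixed literal keys and is only appended to and iterated in
-- insertion order, so it is ported as a six-component tuple ('items()' order =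
-- the literal key order below).
def pvCondSession (p : String) : Bool :=
  PySem.Str.isIn "session" p || PySem.Str.isIn "character" p || PySem.Str.isIn "init" p ||
  PySem.Str.isIn "resume" p || PySem.Str.isIn "state" p

def pvCondGameLoop (p : String) : Bool :=
  PySem.Str.isIn "game_loop" p || PySem.Str.isIn "exploration" p || PySem.Str.isIn "movement" p ||
  PySem.Str.isIn "investigation" p || PySem.Str.isIn "npc" p

def pvCondCombat (p : String) : Bool :=
  PySem.Str.isIn "combat" p || PySem.Str.isIn "attack" p || PySem.Str.isIn "death" p

def pvCondProgression (p : String) : Bool :=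
  PySem.Str.isIn "xp" p || PySem.Str.isIn "level" p || PySem.Str.isIn "quest" p ||
  PySem.Str.isIn "loot" p || PySem.Str.isIn "reputation" p

def pvCondUtilities (p : String) : Bool :=
  PySem.Str.isIn "shop" p || PySem.Str.isIn "rest" p || PySem.Str.isIn "inventory" p

def pvCats :=
  List String × List String × List String × List String × List String × List String

def pvStepA (acc : pvCats) (p : String) : pvCats :=
  if pvCondSession p then (acc.1 ++ [p], acc.2.1, acc.2.2.1, acc.2.2.2.1, acc.2.2.2.2.1, acc.2.2.2.2.2)
  else if pvCondGameLoop p then (acc.1, acc.2.1 ++ [p], acc.2.2.1, acc.2.2.2.1, acc.2.2.2.2.1, acc.2.2.2.2.2)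
  else if pvCondCombat p then (acc.1, acc.2.1, acc.2.2.1 ++ [p], acc.2.2.2.1, acc.2.2.2.2.1, acc.2.2.2.2.2)
  else if pvCondProgression p then (acc.1, acc.2.1, acc.2.2.1, acc.2.2.2.1 ++ [p], acc.2.2.2.2.1, acc.2.2.2.2.2)
  else if pvCondUtilities p then (acc.1, acc.2.1, acc.2.2.1, acc.2.2.2.1, acc.2.2.2.2.1 ++ [p], acc.2.2.2.2.2)
  else (acc.1, acc.2.1, acc.2.2.1, acc.2.2.2.1, acc.2.2.2.2.1, acc.2.2.2.2.2 ++ [p])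

def build_protocol_index (protocol_ids : List String) : String :=
  let cats := protocol_ids.foldl pvStepA (([] : List String), [], [], [], [], [])
  let items : List (String × List String) :=
    [("session_management", cats.1), ("game_loop", cats.2.1), ("combat", cats.2.2.1),
     ("progression", cats.2.2.2.1), ("utilities", cats.2.2.2.2.1), ("meta", cats.2.2.2.2.2)]
  let index_lines :=
    items.foldl (fun lines nl =>
      if nl.2.isEmpty then lines
      else lines ++ [nl.1 ++ ":"] ++ nl.2.map (fun p => "  - " ++ p)) ["[PROTOCOL_INDEX]"]
  PySem.Str.join "\n" index_lines

-- ===== PORT B =====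
def pvKwTable : List (String × List String) :=
  [("session_management", ["session", "character", "init", "resume", "state"]),
   ("game_loop", ["game_loop", "exploration", "movement", "investigation", "npc"]),
   ("combat", ["combat", "attack", "death"]),
   ("progression", ["xp", "level", "quest", "loot", "reputation"]),
   ("utilities", ["shop", "rest", "inventory"])]

-- index of the first matching table entry; table length (= 5) when none matches,
-- exactly Source B's next((i ...), len(CATEGORIES))
def pvCatB (p : String) : Int :=
  (pvKwTable.findIdx (fun e => e.2.any (fun k => PySem.Str.isIn k p)) : Nat)

def build_protocol_index_alt (protocol_ids : List String) : String :=
  let names := pvKwTable.map Prod.fst ++ ["meta"]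
  let cats := protocol_ids.map pvCatB
  let lines :=
    (PySem.List.enumerate names).foldl (fun lines inm =>
      let members := ((protocol_ids.zip cats).filter (fun pc => pc.2 == inm.1)).map Prod.fst
      if members.isEmpty then lines
      else lines ++ [inm.2 ++ ":"] ++ members.map (fun p => "  - " ++ p)) ["[PROTOCOL_INDEX]"]
  PySem.Str.join "\n" lines

-- ===== PRECONDITION & SPEC =====
def Spec_build_protocol_index (protocol_ids : List String) (out : String) : Prop := out = build_protocol_index_alt protocol_ids
instance (protocol_ids : List String) (out : String) : Decidable (Spec_build_protocol_index protocol_ids out) := by unfold Spec_build_protocol_index; infer_instance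

-- ===== CLAIM (what is proved, stated in full; the proofs are below) =====
def Claim_equal_build_protocol_index : Prop := ∀ (protocol_ids : List String), Dom_build_protocol_index protocol_ids → Spec_build_protocol_index protocol_ids (build_protocol_index protocol_ids)

-- ===== LEMMAS AND PROOFS =====

-- B's first-match table index agrees with A's elif chain
theorem pvAny_session (p : String) :
    (["session", "character", "init", "resume", "state"].any (fun k => PySem.Str.isIn k p)) = pvCondSession p := by
  simp [pvCondSession, Bool.or_assoc]

theorem pvAny_game (p : String) :
    (["game_loop", "exploration", "movement", "investigation", "npc"].any (fun k => PySem.Str.isIn k p)) = pvCondGameLoop p := by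
  simp [pvCondGameLoop, Bool.or_assoc]

theorem pvAny_combat (p : String) :
    (["combat", "attack", "death"].any (fun k => PySem.Str.isIn k p)) = pvCondCombat p := by
  simp [pvCondCombat, Bool.or_assoc]

theorem pvAny_prog (p : String) :
    (["xp", "level", "quest", "loot", "reputation"].any (fun k => PySem.Str.isIn k p)) = pvCondProgression p := by
  simp [pvCondProgression, Bool.or_assoc]

theorem pvAny_util (p : String) :
    (["shop", "rest", "inventory"].any (fun k => PySem.Str.isIn k p)) = pvCondUtilities p := by
  simp [pvCondUtilities, Bool.or_assoc]

-- B's first-match table index agrees with A's elif chain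
theorem pvCatB_eq (p : String) :
    pvCatB p =
      if pvCondSession p then 0 else if pvCondGameLoop p then 1
      else if pvCondCombat p then 2 else if pvCondProgression p then 3
      else if pvCondUtilities p then 4 else 5 := by
  simp only [pvCatB, pvKwTable, List.findIdx_cons, List.findIdx_nil,
    pvAny_session, pvAny_game, pvAny_combat, pvAny_prog, pvAny_util, Bool.cond_eq_ite]
  split_ifs <;> simp

-- A's one-pass partition computes, in each component, B's per-category filter
theorem pv_fold_partition (l : List String) (a b c d e f : List String) :
    l.foldl pvStepA (a, b, c, d, e, f) =
      (a ++ l.filter (fun p => pvCatB p == 0), b ++ l.filter (fun p => pvCatB p == 1),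
       c ++ l.filter (fun p => pvCatB p == 2), d ++ l.filter (fun p => pvCatB p == 3),
       e ++ l.filter (fun p => pvCatB p == 4), f ++ l.filter (fun p => pvCatB p == 5)) := by
  induction l generalizing a b c d e f with
  | nil => simp
  | cons x t ih =>
    simp only [List.foldl_cons, List.filter_cons, pvStepA]
    by_cases h1 : pvCondSession x <;> by_cases h2 : pvCondGameLoop x <;>
    by_cases h3 : pvCondCombat x <;> by_cases h4 : pvCondProgression x <;>
    by_cases h5 : pvCondUtilities x <;>
    · have hc := pvCatB_eq x
      simp only [h1, h2, h3, h4, h5, if_true] at hc ⊢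
      simp [ih, hc]

-- B's zip-with-precomputed-categories comprehension is the plain filter by category
theorem pv_zip_filter (l : List String) (i : Int) :
    ((l.zip (l.map pvCatB)).filter (fun pc => pc.2 == i)).map Prod.fst
      = l.filter (fun p => pvCatB p == i) := by
  induction l with
  | nil => rfl
  | cons x t ih =>
    simp only [List.map_cons, List.zip_cons_cons, List.filter_cons]
    by_cases h : (pvCatB x == i) <;> simp [h, ih]

theorem build_protocol_index_eq (protocol_ids : List String) :
    build_protocol_index protocol_ids = build_protocol_index_alt protocol_ids := by
  simp only [build_protocol_index, build_protocol_index_alt,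
    pv_fold_partition, pv_zip_filter, List.nil_append, pvKwTable, List.map_cons, List.map_nil,
    List.foldl_cons, List.foldl_nil]
  rfl

-- ===== VERDICT (by name: the statement is the Claim_ definition above) =====
theorem build_protocol_index_spec : Claim_equal_build_protocol_index := by
  intro protocol_ids _
  exact build_protocol_index_eq protocol_ids
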